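-- pv_equiv track=rewrite | github.com/skoskosko/dippatyo | code/model_generator/generate_v2.py | get_points_around
-- ===== SOURCE A (Python) =====
-- def get_points_around(x, y, radius, x_l, y_l):
--     points = []
--
--     # Loop through all possible points within the bounding square of the radius
--     for dx in range(-radius, radius + 1):
--         for dy in range(-radius, radius + 1):
--             # Calculate the new point
--             new_x = int(x + dx)
--             new_y = int(y + dy)
--
--             # Check if the new point is within the circle (using the radius constraint)
--             if (dx**2 + dy**2) <= radius**2:
--                 # Check if the new point is within the limits
--                 if 0 <= new_x <= x_l and 0 <= new_y <= y_l:
--                     points.append((new_x, new_y))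
--
--     return points
-- ===== SOURCE B (Python) =====
-- def get_points_around(x, y, radius, x_l, y_l):
--     points = []
--     r2 = radius * radius
--     for dx in range(-radius, radius + 1):
--         rem = r2 - dx * dx  # >= 0 for every dx in the range
--         # exact integer half-width of this row: largest m with m*m <= rem
--         m = 0
--         while (m + 1) * (m + 1) <= rem:
--             m += 1
--         for dy in range(-m, m + 1):
--             new_x = x + dx
--             new_y = y + dy
--             if 0 <= new_x <= x_l and 0 <= new_y <= y_l:
--                 points.append((new_x, new_y))
--     return points
-- ===== Notes on version B (the rewrite author's own statement) =====
-- stated objective: alternative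
-- what changed: Instead of testing the circle condition dx^2+dy^2<=r^2 on every cell of the full (2r+1)x(2r+1) bounding square, B derives for each dx the exact row half-width m = floor(sqrt(r^2-dx^2)) with an incremental integer square-root loop and iterates dy only over [-m, m], so only cells inside the disk are visited and the per-cell circle test disappears.
import Mathlib
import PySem

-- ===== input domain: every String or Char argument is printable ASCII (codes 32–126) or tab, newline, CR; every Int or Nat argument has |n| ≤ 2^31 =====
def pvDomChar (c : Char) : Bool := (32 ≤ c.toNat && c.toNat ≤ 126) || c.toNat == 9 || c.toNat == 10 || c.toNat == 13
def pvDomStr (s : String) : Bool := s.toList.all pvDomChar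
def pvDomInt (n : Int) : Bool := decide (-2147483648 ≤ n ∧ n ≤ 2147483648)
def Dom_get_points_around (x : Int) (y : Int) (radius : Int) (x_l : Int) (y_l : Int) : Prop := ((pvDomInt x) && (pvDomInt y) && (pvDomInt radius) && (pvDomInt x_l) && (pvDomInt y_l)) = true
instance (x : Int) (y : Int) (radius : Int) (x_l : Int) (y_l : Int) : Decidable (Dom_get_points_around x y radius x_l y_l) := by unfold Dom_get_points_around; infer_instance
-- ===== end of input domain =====

-- B replaces A's per-cell circle test over the full bounding square by exact per-row
-- half-widths m = ⌊√(r²-dx²)⌋ (an incremental integer-sqrt loop), so it visits only the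
-- cells inside the disk (an alternative algorithm; row-major order is preserved).

-- ===== PORT A =====
def get_points_around (x : Int) (y : Int) (radius : Int) (x_l : Int) (y_l : Int) : List (Int × Int) :=
  (PySem.List.pyRange (-radius) (radius + 1) 1).foldl (fun points dx =>
    (PySem.List.pyRange (-radius) (radius + 1) 1).foldl (fun points dy =>
      let new_x := x + dx
      let new_y := y + dy
      if dx * dx + dy * dy ≤ radius * radius then
        if 0 ≤ new_x ∧ new_x ≤ x_l ∧ 0 ≤ new_y ∧ new_y ≤ y_l then
          points ++ [(new_x, new_y)]
        else points
      else points) points) []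

-- ===== PORT B =====
-- Source B's `while (m+1)*(m+1) <= rem: m += 1` starting from m = 0; m only ever grows from 0,
-- so it is a Nat here (the Int value of Python's m is its cast).
def pvIsqrtLoop (rem : Int) (m : Nat) : Nat :=
  if ((m : Int) + 1) * ((m : Int) + 1) ≤ rem then pvIsqrtLoop rem (m + 1) else m
termination_by (rem + 1 - (m : Int) * (m : Int)).toNat
decreasing_by
  have h1 : (m : Int) * (m : Int) < ((m : Int) + 1) * ((m : Int) + 1) := by nlinarith [Int.natCast_nonneg m]
  push_cast
  omega

def get_points_around_alt (x : Int) (y : Int) (radius : Int) (x_l : Int) (y_l : Int) : List (Int × Int) :=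
  let r2 := radius * radius
  (PySem.List.pyRange (-radius) (radius + 1) 1).foldl (fun points dx =>
    let rem := r2 - dx * dx
    let m : Int := (pvIsqrtLoop rem 0 : Nat)
    (PySem.List.pyRange (-m) (m + 1) 1).foldl (fun points dy =>
      let new_x := x + dx
      let new_y := y + dy
      if 0 ≤ new_x ∧ new_x ≤ x_l ∧ 0 ≤ new_y ∧ new_y ≤ y_l then
        points ++ [(new_x, new_y)]
      else points) points) []

-- ===== PRECONDITION & SPEC =====
def Spec_get_points_around (x : Int) (y : Int) (radius : Int) (x_l : Int) (y_l : Int) (out : List (Int × Int)) : Prop := out = get_points_around_alt x y radius x_l y_l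
instance (x : Int) (y : Int) (radius : Int) (x_l : Int) (y_l : Int) (out : List (Int × Int)) : Decidable (Spec_get_points_around x y radius x_l y_l out) := by unfold Spec_get_points_around; infer_instance

-- ===== CLAIM (what is proved, stated in full; the proofs are below) =====
def Claim_equal_get_points_around : Prop := ∀ (x : Int) (y : Int) (radius : Int) (x_l : Int) (y_l : Int), Dom_get_points_around x y radius x_l y_l → Spec_get_points_around x y radius x_l y_l (get_points_around x y radius x_l y_l)

-- ===== LEMMAS AND PROOFS =====

-- the isqrt loop computes the floor square root: starting from m with m² ≤ rem, the result s
-- satisfies s² ≤ rem < (s+1)².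
theorem pvIsqrtLoop_spec (rem : Int) :
    ∀ (n m : Nat), (rem + 1 - (m : Int) * (m : Int)).toNat ≤ n → (m : Int) * (m : Int) ≤ rem →
    ((pvIsqrtLoop rem m : Nat) : Int) * ((pvIsqrtLoop rem m : Nat) : Int) ≤ rem ∧
    rem < (((pvIsqrtLoop rem m : Nat) : Int) + 1) * (((pvIsqrtLoop rem m : Nat) : Int) + 1) := by
  intro n
  induction n with
  | zero =>
    intro m hn h
    exfalso
    have hab : (0:Int) < rem + 1 - (m : Int) * (m : Int) := by linarith
    omega
  | succ n ih =>
    intro m hn h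
    rw [pvIsqrtLoop]
    split
    · next hlt =>
      refine ih (m + 1) ?_ (by push_cast; linarith)
      have hab : (m : Int) * (m : Int) < ((m : Int) + 1) * ((m : Int) + 1) := by
        nlinarith [Int.natCast_nonneg m]
      push_cast
      omega
    · next hlt =>
      exact ⟨h, by push_cast at hlt ⊢; omega⟩

-- dy² ≤ rem ↔ -s ≤ dy ≤ s, for s the floor square root of rem
theorem sq_le_iff_abs_le (rem s dy : Int) (hs0 : 0 ≤ s)
    (h1 : s * s ≤ rem) (h2 : rem < (s + 1) * (s + 1)) :
    dy * dy ≤ rem ↔ (-s ≤ dy ∧ dy ≤ s) := by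
  constructor
  · intro h
    constructor <;> by_contra hc <;> push Not at hc <;> nlinarith
  · intro ⟨ha, hb⟩
    nlinarith

-- ===== VERDICT (by name: the statement is the Claim_ definition above) =====
theorem get_points_around_spec : Claim_equal_get_points_around := by
  intro x y radius x_l y_l _
  simp only [Spec_get_points_around, get_points_around, get_points_around_alt]
  refine PySem.List.foldl_congr_mem _ _ _ _ ?_
  intro acc dx hdx
  rw [PySem.List.mem_pyRange_one] at hdx
  have hr0 : 0 ≤ radius := by omega
  have hdx2 : dx * dx ≤ radius * radius := by nlinarith
  set rem : Int := radius * radius - dx * dx with hrem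
  have hrem0 : 0 ≤ rem := by omega
  set s : Int := ((pvIsqrtLoop rem 0 : Nat) : Int) with hs
  have hs0 : 0 ≤ s := Int.natCast_nonneg _
  obtain ⟨hs1, hs2⟩ := pvIsqrtLoop_spec rem ((rem + 1 - (0 : Int) * (0 : Int)).toNat) 0 le_rfl (by simpa using hrem0)
  rw [← hs] at hs1 hs2
  have hsr : s ≤ radius := by nlinarith
  have hcirc : ∀ dy : Int, (dx * dx + dy * dy ≤ radius * radius) ↔ (-s ≤ dy ∧ dy ≤ s) := by
    intro dy
    have h := sq_le_iff_abs_le rem s dy hs0 hs1 hs2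
    constructor
    · intro hc; exact h.mp (by omega)
    · intro hc; have := h.mpr hc; omega
  -- A's inner loop as a filter over the full row
  have hA :
      (PySem.List.pyRange (-radius) (radius + 1) 1).foldl (fun points dy =>
        if dx * dx + dy * dy ≤ radius * radius then
          if 0 ≤ x + dx ∧ x + dx ≤ x_l ∧ 0 ≤ y + dy ∧ y + dy ≤ y_l then
            points ++ [(x + dx, y + dy)]
          else points
        else points) acc
      = acc ++ ((PySem.List.pyRange (-radius) (radius + 1) 1).filter
            (fun dy => decide ((dx * dx + dy * dy ≤ radius * radius) ∧
              (0 ≤ x + dx ∧ x + dx ≤ x_l ∧ 0 ≤ y + dy ∧ y + dy ≤ y_l)))).map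
            (fun dy => (x + dx, y + dy)) := by
    rw [← PySem.List.foldl_append_ite
      (fun dy => (dx * dx + dy * dy ≤ radius * radius) ∧
        (0 ≤ x + dx ∧ x + dx ≤ x_l ∧ 0 ≤ y + dy ∧ y + dy ≤ y_l))
      (fun dy => (x + dx, y + dy)) _ acc]
    refine PySem.List.foldl_congr_mem _ _ _ _ ?_
    intro acc' dy _
    by_cases h1 : dx * dx + dy * dy ≤ radius * radius <;>
      by_cases h2 : 0 ≤ x + dx ∧ x + dx ≤ x_l ∧ 0 ≤ y + dy ∧ y + dy ≤ y_l <;>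
      simp [h1, h2]
  -- B's inner loop as a filter over the narrowed row
  have hB :
      (PySem.List.pyRange (-s) (s + 1) 1).foldl (fun points dy =>
        if 0 ≤ x + dx ∧ x + dx ≤ x_l ∧ 0 ≤ y + dy ∧ y + dy ≤ y_l then
          points ++ [(x + dx, y + dy)]
        else points) acc
      = acc ++ ((PySem.List.pyRange (-s) (s + 1) 1).filter
            (fun dy => decide (0 ≤ x + dx ∧ x + dx ≤ x_l ∧ 0 ≤ y + dy ∧ y + dy ≤ y_l))).map
            (fun dy => (x + dx, y + dy)) :=
    PySem.List.foldl_append_ite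
      (fun dy => 0 ≤ x + dx ∧ x + dx ≤ x_l ∧ 0 ≤ y + dy ∧ y + dy ≤ y_l)
      (fun dy => (x + dx, y + dy)) _ acc
  rw [hA, hB]
  congr 1
  congr 1
  -- split the full row into the part below, inside and above the disk slab
  have hsplit : PySem.List.pyRange (-radius) (radius + 1) 1
      = PySem.List.pyRange (-radius) (-s) 1 ++ (PySem.List.pyRange (-s) (s + 1) 1
          ++ PySem.List.pyRange (s + 1) (radius + 1) 1) := by
    rw [← PySem.List.pyRange_one_append (-s) (s + 1) (radius + 1) (by omega) (by omega),
        ← PySem.List.pyRange_one_append (-radius) (-s) (radius + 1) (by omega) (by omega)]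
  rw [hsplit]
  simp only [List.filter_append]
  have hleft : (PySem.List.pyRange (-radius) (-s) 1).filter
      (fun dy => decide ((dx * dx + dy * dy ≤ radius * radius) ∧
        (0 ≤ x + dx ∧ x + dx ≤ x_l ∧ 0 ≤ y + dy ∧ y + dy ≤ y_l))) = [] := by
    rw [List.filter_eq_nil_iff]
    intro dy hdy
    rw [PySem.List.mem_pyRange_one] at hdy
    simp only [decide_eq_true_eq, not_and]
    intro hc
    exact absurd ((hcirc dy).mp hc).1 (by omega)
  have hright : (PySem.List.pyRange (s + 1) (radius + 1) 1).filter
      (fun dy => decide ((dx * dx + dy * dy ≤ radius * radius) ∧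
        (0 ≤ x + dx ∧ x + dx ≤ x_l ∧ 0 ≤ y + dy ∧ y + dy ≤ y_l))) = [] := by
    rw [List.filter_eq_nil_iff]
    intro dy hdy
    rw [PySem.List.mem_pyRange_one] at hdy
    simp only [decide_eq_true_eq, not_and]
    intro hc
    exact absurd ((hcirc dy).mp hc).2 (by omega)
  rw [hleft, hright, List.nil_append, List.append_nil]
  refine List.filter_congr ?_
  intro dy hdy
  rw [PySem.List.mem_pyRange_one] at hdy
  have hc : dx * dx + dy * dy ≤ radius * radius := (hcirc dy).mpr (by omega)
  simp [hc]
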